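-- pv_equiv track=rewrite | github.com/Hyeonsoek/Problem-solving | boj/20000/21611.py | marble_bomb
-- ===== SOURCE A (Python) =====
-- def remove_zero(line):
--     temp = []
--     for x in line:
--         if x > 0:
--             temp.append(x)
--     return temp
--
-- def marble_bomb(line):
--     ret = 0
--
--     while True:
--         if not line:
--             break
--
--         bomb_count = 0
--         count = 1
--         value = line[0]
--         for x in range(1, len(line)):
--             if value == line[x]:
--                 count += 1
--             else:
--                 if count >= 4:
--                     bomb_count += 1
--                     for y in range(x-count, x):
--                         line[y] = 0
--                     ret += value * count
--                 value = line[x]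
--                 count = 1
--
--         if count >= 4:
--             bomb_count += 1
--             for y in range(len(line)-count, len(line)):
--                 line[y] = 0
--             ret += value * count
--
--         line = remove_zero(line)
--
--         if bomb_count == 0:
--             break
--
--     return ret, line
-- ===== SOURCE B (Python) =====
-- def marble_bomb(line):
--     # Encode the line ONCE into a list of [value, count] runs; every later pass
--     # works only on the run list (explode runs of >= 4, drop nonpositive runs,
--     # merge newly adjacent equal runs in place), never rebuilding the element
--     # list until the final decode.
--     groups = []
--     for x in line:
--         if groups and groups[-1][0] == x:
--             groups[-1][1] += 1
--         else:
--             groups.append([x, 1])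
--     ret = 0
--     while True:
--         kept = []
--         bombed = False
--         for v, c in groups:
--             if c >= 4:
--                 ret += v * c
--                 bombed = True
--             elif v > 0:
--                 if kept and kept[-1][0] == v:
--                     kept[-1][1] += c
--                 else:
--                     kept.append([v, c])
--         groups = kept
--         if not bombed:
--             break
--     out = []
--     for v, c in groups:
--         out.extend([v] * c)
--     return ret, out
-- ===== Notes on version B (the rewrite author's own statement) =====
-- stated objective: alternative
-- what changed: A re-scans the flat marble list by index every pass, zero-marks exploded runs in place and compacts with a remove_zero sweep; B run-length-encodes the line ONCE and every pass works purely on the (value,count) run list - scoring and dropping runs of >= 4, dropping nonpositive runs and merging newly adjacent equal runs in place - decoding back to a flat list only once at the end; the pass-by-pass structure itself is forced by A's simultaneous-explosion semantics (a one-pass stack cascade returns different values, e.g. on [1,1,2,2,2,2,1,1,1,1]).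
import Mathlib
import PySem

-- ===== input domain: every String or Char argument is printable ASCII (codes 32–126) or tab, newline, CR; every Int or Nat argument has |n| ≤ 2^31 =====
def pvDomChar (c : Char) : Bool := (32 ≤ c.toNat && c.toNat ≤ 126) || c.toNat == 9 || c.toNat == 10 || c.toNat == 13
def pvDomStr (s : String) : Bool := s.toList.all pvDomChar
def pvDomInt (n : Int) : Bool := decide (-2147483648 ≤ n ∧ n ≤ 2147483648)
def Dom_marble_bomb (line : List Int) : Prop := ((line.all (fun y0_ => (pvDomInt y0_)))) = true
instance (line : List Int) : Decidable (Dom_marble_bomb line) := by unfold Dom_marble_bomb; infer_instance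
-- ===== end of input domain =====

-- B run-length-encodes the line once and runs every explosion pass on the (value,count)
-- run list alone (score/drop runs >= 4, drop nonpositive runs, merge newly adjacent equal
-- runs in place), decoding to a flat list only at the end; objective: alternative
-- structure, same exact return value.  Python A mutates the caller's list in place (zero
-- writes during a pass); the equivalence proved here is about the RETURN value only — B
-- does not mutate its argument.

-- ===== PORT A =====
-- 'for y in range(a, b): line[y] = 0'; the indices A uses are always in range, where .set is exact
def setZeros (ln : List Int) (a b : Int) : List Int :=
  (PySem.List.pyRange a b 1).foldl (fun l y => l.set y.toNat 0) ln

def remove_zero (line : List Int) : List Int :=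
  line.foldl (fun temp x => if x > 0 then temp ++ [x] else temp) []

-- one step of A's 'for x in range(1, len(line))' loop; state (line, bomb_count, count, value, ret)
def mbStep (s : List Int × Int × Int × Int × Int) (x : Int) :
    List Int × Int × Int × Int × Int :=
  let (ln, bomb, count, value, ret) := s
  if value = PySem.List.pyGetD ln x 0 then
    (ln, bomb, count + 1, value, ret)
  else
    let (ln, bomb, ret) :=
      if count ≥ 4 then (setZeros ln (x - count) x, bomb + 1, ret + value * count)
      else (ln, bomb, ret)
    (ln, bomb, (1 : Int), PySem.List.pyGetD ln x 0, ret)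

-- the code after A's for loop: trailing-run flush, then 'line = remove_zero(line)'
def mbFinish (s : List Int × Int × Int × Int × Int) : Int × Int × List Int :=
  let (ln, bomb, count, value, ret) := s
  let (ln, bomb, ret) :=
    if count ≥ 4 then
      (setZeros ln ((ln.length : Int) - count) (ln.length : Int), bomb + 1, ret + value * count)
    else (ln, bomb, ret)
  (ret, bomb, remove_zero ln)

-- A's 'while True' loop; fuel only makes the recursion structural (a pass that continues
-- removes at least 4 elements, so line.length + 1 passes never run out)
def mbGo : Nat → Int → List Int → Int × List Int
  | 0, ret, line => (ret, line)
  | fuel + 1, ret, line =>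
    if line = [] then (ret, line)
    else
      let (ret, bomb, line) :=
        mbFinish ((PySem.List.pyRange 1 (line.length : Int) 1).foldl mbStep
                    (line, 0, 1, PySem.List.pyGetD line 0 0, ret))
      if bomb = 0 then (ret, line) else mbGo fuel ret line

def marble_bomb (line : List Int) : Int × List Int :=
  mbGo (line.length + 1) 0 line

-- ===== PORT B =====
-- Source B's 'mutate the last run or append a fresh one' operation, used by both the encoder
-- ('groups[-1][1] += 1' with c = 1) and the keep loop ('kept[-1][1] += c')
def pushRun (gs : List (Int × Int)) (v c : Int) : List (Int × Int) :=
  match gs.getLast? with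
  | some g => if g.1 = v then gs.dropLast ++ [(g.1, g.2 + c)] else gs ++ [(v, c)]
  | none => [(v, c)]

-- one step of Source B's encoding loop 'for x in line'
def encStep (gs : List (Int × Int)) (x : Int) : List (Int × Int) := pushRun gs x 1

-- one step of Source B's 'for v, c in groups' pass; state (ret, kept, bombed)
def keepStep (s : Int × List (Int × Int) × Bool) (g : Int × Int) :
    Int × List (Int × Int) × Bool :=
  let (ret, kept, bombed) := s
  let (v, c) := g
  if c ≥ 4 then (ret + v * c, kept, true)
  else if v > 0 then (ret, pushRun kept v c, bombed)
  else (ret, kept, bombed)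

-- Source B's 'while True' loop over the run list; same fuel discipline as A's port
def altLoop : Nat → Int → List (Int × Int) → Int × List (Int × Int)
  | 0, ret, gs => (ret, gs)
  | fuel + 1, ret, gs =>
    let (ret, kept, bombed) := gs.foldl keepStep (ret, [], false)
    if bombed then altLoop fuel ret kept else (ret, kept)

-- Source B's final decode loop 'for v, c in groups: out.extend([v] * c)'
def decodeRuns (gs : List (Int × Int)) : List Int :=
  gs.foldl (fun out g => out ++ List.replicate g.2.toNat g.1) []

def marble_bomb_alt (line : List Int) : Int × List Int :=
  let p := altLoop (line.length + 1) 0 (line.foldl encStep [])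
  (p.1, decodeRuns p.2)

-- ===== PRECONDITION & SPEC =====
def Spec_marble_bomb (line : List Int) (out : Int × List Int) : Prop := out = marble_bomb_alt line
instance (line : List Int) (out : Int × List Int) : Decidable (Spec_marble_bomb line out) := by unfold Spec_marble_bomb; infer_instance

-- ===== CLAIM (what is proved, stated in full; the proofs are below) =====
def Claim_equal_marble_bomb : Prop := ∀ (line : List Int), Dom_marble_bomb line → Spec_marble_bomb line (marble_bomb line)

-- ===== LEMMAS AND PROOFS =====

-- run-length decomposition of a line, starting from a current run (value v, count c > 0)
def collect (v c : Int) : List Int → List (Int × Int)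
  | [] => [(v, c)]
  | x :: xs => if v = x then collect v (c + 1) xs else (v, c) :: collect x 1 xs

def gScore : List (Int × Int) → Int
  | [] => 0
  | (v, c) :: t => (if c ≥ 4 then v * c else 0) + gScore t

def gBomb : List (Int × Int) → Int
  | [] => 0
  | (_, c) :: t => (if c ≥ 4 then 1 else 0) + gBomb t

def gKept : List (Int × Int) → List Int
  | [] => []
  | (v, c) :: t => (if c ≥ 4 then [] else if v > 0 then List.replicate c.toNat v else []) ++ gKept t

-- flat decoding of a run list (semantic form of decodeRuns)
def gFlat : List (Int × Int) → List Int
  | [] => []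
  | (v, c) :: t => List.replicate c.toNat v ++ gFlat t

-- well-formed run list: adjacent runs carry distinct values, every count is ≥ 1
def NormB : List (Int × Int) → Prop
  | [] => True
  | [g] => 1 ≤ g.2
  | g :: h :: t => 1 ≤ g.2 ∧ g.1 ≠ h.1 ∧ NormB (h :: t)

lemma gFlat_cons (g : Int × Int) (t : List (Int × Int)) :
    gFlat (g :: t) = List.replicate g.2.toNat g.1 ++ gFlat t := by
  obtain ⟨v, c⟩ := g; rfl

lemma rz_filter (l : List Int) : remove_zero l = l.filter (fun x => decide (x > 0)) := by
  simpa [remove_zero] using PySem.List.foldl_append_ite_eq_filter (fun x : Int => x > 0) l []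

lemma rz_append (a b : List Int) : remove_zero (a ++ b) = remove_zero a ++ remove_zero b := by
  simp [rz_filter]

lemma rz_replicate (c : Nat) (v : Int) :
    remove_zero (List.replicate c v) = if v > 0 then List.replicate c v else [] := by
  simp [rz_filter, List.filter_replicate]

lemma rz_rep0 (c : Nat) : remove_zero (List.replicate c (0 : Int)) = [] := by
  simp [rz_replicate]

lemma rz_nil : remove_zero ([] : List Int) = [] := rfl

lemma setZeros_spec : ∀ (c : Nat) (pre rest : List Int) (v : Int) (a b : Int),
    a = pre.length → b = (pre.length : Int) + c →
    setZeros (pre ++ List.replicate c v ++ rest) a b = pre ++ List.replicate c 0 ++ rest := by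
  intro c
  induction c with
  | zero =>
    intro pre rest v a b ha hb
    subst ha; subst hb
    simp only [Nat.cast_zero, add_zero]
    rw [setZeros, PySem.List.pyRange_one_eq_nil le_rfl]
    simp
  | succ c ih =>
    intro pre rest v a b ha hb
    subst ha; subst hb
    have hcons := PySem.List.pyRange_one_cons
      (a := (pre.length : Int)) (b := (pre.length : Int) + ((c : Nat) + 1 : Nat)) (by push_cast; omega)
    rw [setZeros, hcons, List.foldl_cons]
    have hset : ((pre ++ List.replicate (c+1) v ++ rest).set (Int.toNat (pre.length : Int)) 0)
        = (pre ++ [0]) ++ List.replicate c v ++ rest := by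
      rw [List.replicate_succ]
      simp [List.set_append]
    rw [hset]
    have h2 := ih (pre ++ [0]) rest v ((pre.length : Int) + 1) ((pre.length : Int) + ((c : Nat) + 1 : Nat))
      (by push_cast; simp) (by push_cast; simp; try ring)
    rw [setZeros] at h2
    rw [h2]
    simp [List.replicate_succ, List.append_assoc]

lemma pyGetD_mid (pre mid : List Int) (x : Int) (xs : List Int) (d : Int) (i : Int)
    (hi : i = (pre.length : Int) + mid.length) :
    PySem.List.pyGetD (pre ++ mid ++ x :: xs) i d = x := by
  subst hi
  rw [show pre ++ mid ++ x :: xs = (pre ++ mid) ++ x :: xs by simp]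
  rw [PySem.List.pyGetD_eq_getElem _ _ (by positivity) (by simp <;> omega)]
  have h1 : (Int.toNat ((pre.length : Int) + mid.length)) = (pre ++ mid).length := by
    simp; omega
  rw [List.getElem_append_right (by omega)]
  simp [h1]

-- ===== A's single pass =====
lemma passA_eq : ∀ (rest pre : List Int) (v : Int) (c : Nat) (bomb ret : Int) (a b : Int),
    0 < c → a = (pre.length : Int) + c → b = a + rest.length →
    mbFinish ((PySem.List.pyRange a b 1).foldl mbStep
        (pre ++ List.replicate c v ++ rest, bomb, (c : Int), v, ret))
    = (ret + gScore (collect v c rest), bomb + gBomb (collect v c rest),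
       remove_zero pre ++ gKept (collect v c rest)) := by
  intro rest
  induction rest with
  | nil =>
    intro pre v c bomb ret a b hc ha hb
    subst ha; subst hb
    rw [PySem.List.pyRange_one_eq_nil (by simp)]
    rw [List.foldl_nil]
    by_cases h4 : (4 : Int) ≤ (c : Int)
    · have hset := setZeros_spec c pre [] v ((pre.length : Int)) ((pre.length : Int) + c) rfl rfl
      simp only [mbFinish]
      rw [if_pos (by exact h4)]
      have hlen : (((pre ++ List.replicate c v ++ ([] : List Int)).length : Int)) - (c : Int)
          = (pre.length : Int) := by simp
      have hlen2 : (((pre ++ List.replicate c v ++ ([] : List Int)).length : Int))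
          = (pre.length : Int) + c := by simp
      rw [hlen, hlen2, hset]
      simp [collect, gScore, gBomb, gKept, rz_append, rz_rep0, if_pos h4]
      refine ⟨by omega, by omega, by omega⟩
    · simp only [mbFinish]
      rw [if_neg (by exact h4)]
      simp [collect, gScore, gBomb, gKept, rz_append, rz_replicate, if_neg h4]
      refine ⟨by omega, by omega, by omega⟩
  | cons x xs ih =>
    intro pre v c bomb ret a b hc ha hb
    subst ha; subst hb
    rw [PySem.List.pyRange_one_cons (by simp <;> omega), List.foldl_cons]
    have hget : PySem.List.pyGetD (pre ++ List.replicate c v ++ x :: xs) ((pre.length : Int) + c) 0 = x :=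
      pyGetD_mid pre (List.replicate c v) x xs 0 _ (by simp)
    by_cases hvx : v = x
    · -- run continues
      have hstep : mbStep (pre ++ List.replicate c v ++ x :: xs, bomb, (c : Int), v, ret) ((pre.length : Int) + c)
          = (pre ++ List.replicate (c+1) v ++ xs, bomb, ((c : Nat) + 1 : Int), v, ret) := by
        simp only [mbStep, hget]
        rw [if_pos hvx]
        subst hvx
        simp [List.replicate_succ']
      rw [hstep]
      have h2 := ih pre v (c+1) bomb ret ((pre.length : Int) + c + 1) ((pre.length : Int) + c + (((x :: xs).length : Int)))
        (by omega) (by push_cast; ring) (by push_cast; simp; try ring)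
      push_cast at h2
      rw [h2]
      simp only [collect, if_pos hvx]
    · -- run breaks at x
      by_cases h4 : (4 : Int) ≤ (c : Int)
      · have hset := setZeros_spec c pre (x :: xs) v ((pre.length : Int) + c - c) ((pre.length : Int) + c)
          (by ring) (by ring)
        have hstep : mbStep (pre ++ List.replicate c v ++ x :: xs, bomb, (c : Int), v, ret) ((pre.length : Int) + c)
            = ((pre ++ List.replicate c 0) ++ List.replicate 1 x ++ xs, bomb + 1, (1 : Int), x, ret + v * c) := by
          simp only [mbStep, hget]
          rw [if_neg hvx, if_pos h4, hset]
          have hget2 : PySem.List.pyGetD (pre ++ List.replicate c 0 ++ x :: xs) ((pre.length : Int) + c) 0 = x :=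
            pyGetD_mid pre (List.replicate c 0) x xs 0 _ (by simp)
          rw [hget2]
          simp
        rw [hstep]
        have h2 := ih (pre ++ List.replicate c 0) x 1 (bomb + 1) (ret + v * c)
          ((pre.length : Int) + c + 1) ((pre.length : Int) + c + (((x :: xs).length : Int)))
          (by omega) (by push_cast; simp; try ring) (by push_cast; simp; try ring)
        simp only [Nat.cast_one] at h2
        rw [h2]
        simp only [collect, if_neg hvx, gScore, gBomb, gKept, if_pos h4]
        rw [rz_append, rz_rep0]
        simp only [Prod.mk.injEq]
        refine ⟨by push_cast; ring, by ring, by simp⟩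
      · have hstep : mbStep (pre ++ List.replicate c v ++ x :: xs, bomb, (c : Int), v, ret) ((pre.length : Int) + c)
            = ((pre ++ List.replicate c v) ++ List.replicate 1 x ++ xs, bomb, (1 : Int), x, ret) := by
          simp only [mbStep, hget]
          rw [if_neg hvx, if_neg h4]
          simp
          simpa [List.append_assoc] using
            pyGetD_mid pre (List.replicate c v) x xs 0 ((pre.length : Int) + (c : Int)) (by simp)
        rw [hstep]
        have h2 := ih (pre ++ List.replicate c v) x 1 bomb ret
          ((pre.length : Int) + c + 1) ((pre.length : Int) + c + (((x :: xs).length : Int)))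
          (by omega) (by push_cast; simp; try ring) (by push_cast; simp; try ring)
        simp only [Nat.cast_one] at h2
        rw [h2]
        simp only [collect, if_neg hvx, gScore, gBomb, gKept, if_neg h4]
        rw [rz_append, rz_replicate]
        simp only [Prod.mk.injEq]
        refine ⟨by push_cast; ring, by ring, by simp [List.append_assoc]⟩

lemma gBomb_nonneg : ∀ gs : List (Int × Int), 0 ≤ gBomb gs := by
  intro gs
  induction gs with
  | nil => simp [gBomb]
  | cons g t ih => obtain ⟨v, c⟩ := g; simp only [gBomb]; split_ifs <;> omega

lemma gBomb_eq_zero_iff (gs : List (Int × Int)) :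
    gBomb gs = 0 ↔ gs.any (fun g => decide ((4 : Int) ≤ g.2)) = false := by
  induction gs with
  | nil => simp [gBomb]
  | cons g t ih =>
    obtain ⟨v, c⟩ := g
    have ht := gBomb_nonneg t
    by_cases h4 : (4 : Int) ≤ c
    · simp [gBomb, h4]
      omega
    · simp [gBomb, h4, ih]

-- ===== pushRun: structural lemmas =====
lemma pushRun_cons (g : Int × Int) (gs : List (Int × Int)) (v c : Int) (h : gs ≠ []) :
    pushRun (g :: gs) v c = g :: pushRun gs v c := by
  cases gs with
  | nil => exact absurd rfl h
  | cons h2 t2 =>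
    unfold pushRun
    rw [List.getLast?_cons_cons, List.dropLast_cons₂]
    cases hl : (h2 :: t2).getLast? with
    | none => exact absurd (List.getLast?_eq_none_iff.mp hl) (by simp)
    | some w =>
      dsimp only
      split_ifs <;> simp

lemma pushRun_head (g : Int × Int) (gs : List (Int × Int)) (v c : Int) :
    ∃ c2 t2, pushRun (g :: gs) v c = (g.1, c2) :: t2 := by
  cases gs with
  | nil =>
    unfold pushRun
    simp only [List.getLast?_singleton, List.dropLast_singleton]
    split_ifs
    · exact ⟨g.2 + c, [], by simp⟩
    · exact ⟨g.2, [(v, c)], by simp⟩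
  | cons h t =>
    rw [pushRun_cons _ _ _ _ (by simp)]
    exact ⟨g.2, pushRun (h :: t) v c, by simp⟩

lemma pushRun_norm : ∀ (gs : List (Int × Int)) (v c : Int), NormB gs → 1 ≤ c →
    NormB (pushRun gs v c) := by
  intro gs
  induction gs with
  | nil => intro v c _ hc; simpa [pushRun, NormB] using hc
  | cons g t ih =>
    intro v c hn hc
    cases t with
    | nil =>
      unfold pushRun
      simp only [List.getLast?_singleton, List.dropLast_singleton]
      have h1 : 1 ≤ g.2 := by simpa [NormB] using hn
      split_ifs with hv
      · simpa [NormB] using by omega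
      · simpa [NormB] using ⟨h1, hv, hc⟩
    | cons h2 t2 =>
      rw [pushRun_cons _ _ _ _ (by simp)]
      obtain ⟨hg, hne, hrest⟩ : 1 ≤ g.2 ∧ g.1 ≠ h2.1 ∧ NormB (h2 :: t2) := hn
      obtain ⟨c2, u2, hp⟩ := pushRun_head h2 t2 v c
      have := ih v c hrest hc
      rw [hp] at this ⊢
      exact ⟨hg, hne, this⟩

lemma gFlat_pushRun : ∀ (gs : List (Int × Int)) (v c : Int), 0 ≤ c → (∀ g ∈ gs, 0 ≤ g.2) →
    gFlat (pushRun gs v c) = gFlat gs ++ List.replicate c.toNat v := by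
  intro gs
  induction gs with
  | nil => intro v c _ _; simp [pushRun, gFlat]
  | cons g t ih =>
    intro v c hc hpos
    cases t with
    | nil =>
      unfold pushRun
      simp only [List.getLast?_singleton, List.dropLast_singleton]
      have hg : 0 ≤ g.2 := hpos g (by simp)
      split_ifs with hv
      · subst hv
        simp only [List.nil_append, gFlat_cons, gFlat]
        rw [Int.toNat_add hg hc, List.replicate_add]
        simp
      · simp [gFlat_cons, gFlat]
    | cons h2 t2 =>
      rw [pushRun_cons _ _ _ _ (by simp)]
      rw [gFlat_cons, gFlat_cons]
      rw [ih v c hc (fun g hg => hpos g (by simp [hg]))]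
      simp [List.append_assoc]

lemma normB_pos : ∀ (gs : List (Int × Int)), NormB gs → ∀ g ∈ gs, 1 ≤ g.2 := by
  intro gs
  induction gs with
  | nil => intro _ g hg; simp at hg
  | cons g t ih =>
    intro hn w hw
    cases t with
    | nil =>
      rcases List.mem_cons.mp hw with h | h
      · subst h; simpa [NormB] using hn
      · simp at h
    | cons h2 t2 =>
      obtain ⟨hg, _, hrest⟩ : 1 ≤ g.2 ∧ g.1 ≠ h2.1 ∧ NormB (h2 :: t2) := hn
      rcases List.mem_cons.mp hw with h | h
      · subst h; exact hg
      · exact ih hrest w h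

-- ===== the encoder builds the canonical run decomposition =====
lemma enc_fold : ∀ (xs : List Int) (gs : List (Int × Int)) (v c : Int), 1 ≤ c →
    xs.foldl encStep (gs ++ [(v, c)]) = gs ++ collect v c xs := by
  intro xs
  induction xs with
  | nil => intro gs v c _; simp [collect]
  | cons x t ih =>
    intro gs v c hc
    rw [List.foldl_cons]
    have hstep : encStep (gs ++ [(v, c)]) x
        = if v = x then gs ++ [(v, c + 1)] else (gs ++ [(v, c)]) ++ [(x, 1)] := by
      unfold encStep pushRun
      rw [List.getLast?_concat, List.dropLast_concat]
    rw [hstep]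
    by_cases hvx : v = x
    · rw [if_pos hvx, ih gs v (c + 1) (by omega)]
      simp [collect, hvx]
    · rw [if_neg hvx, ih (gs ++ [(v, c)]) x 1 (by omega)]
      simp [collect, hvx]

lemma enc_eq (x : Int) (xs : List Int) :
    (x :: xs).foldl encStep [] = collect x 1 xs := by
  rw [List.foldl_cons]
  have h0 : encStep [] x = [] ++ [(x, 1)] := by simp [encStep, pushRun]
  rw [h0, enc_fold xs [] x 1 (by omega)]
  simp

-- collect is a normalized run list headed by v
lemma collect_norm : ∀ (xs : List Int) (v c : Int), 1 ≤ c →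
    NormB (collect v c xs) ∧ ∃ c2 t2, collect v c xs = (v, c2) :: t2 := by
  intro xs
  induction xs with
  | nil => intro v c hc; exact ⟨by simpa [collect, NormB] using hc, c, [], by simp [collect]⟩
  | cons x t ih =>
    intro v c hc
    by_cases hvx : v = x
    · have := ih v (c + 1) (by omega)
      simpa [collect, hvx] using this
    · obtain ⟨hn, c2, t2, heq⟩ := ih x 1 (by omega)
      refine ⟨?_, c, collect x 1 t, by simp [collect, hvx]⟩
      simp only [collect, if_neg hvx]
      rw [heq] at hn ⊢
      exact ⟨hc, by simpa using hvx, hn⟩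

-- decoding collect recovers the line
lemma gFlat_collect : ∀ (xs : List Int) (v c : Int), 0 ≤ c →
    gFlat (collect v c xs) = List.replicate c.toNat v ++ xs := by
  intro xs
  induction xs with
  | nil => intro v c _; simp [collect, gFlat]
  | cons x t ih =>
    intro v c hc
    by_cases hvx : v = x
    · rw [collect, if_pos hvx, ih v (c + 1) (by omega)]
      have : (c + 1).toNat = c.toNat + 1 := by omega
      rw [this, List.replicate_succ']
      simp [hvx]
    · rw [collect, if_neg hvx]
      simp only [gFlat]
      rw [ih x 1 (by omega)]
      simp

-- collect of the decoding of a normalized run list (linking A's pass to B's state)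
lemma collect_replicate : ∀ (k : Nat) (t : List Int) (v c : Int),
    collect v c (List.replicate k v ++ t) = collect v (c + k) t := by
  intro k
  induction k with
  | zero => intro t v c; simp
  | succ k ih =>
    intro t v c
    rw [List.replicate_succ, List.cons_append, collect, if_pos rfl, ih]
    congr 1
    push_cast
    ring

lemma collect_gFlat : ∀ (gs : List (Int × Int)) (v c : Int), 1 ≤ c → NormB gs →
    (∀ c2 t2, gs ≠ (v, c2) :: t2) →
    collect v c (gFlat gs) = (v, c) :: gs := by
  intro gs
  induction gs with
  | nil => intro v c _ _ _; simp [gFlat, collect]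
  | cons g t ih =>
    intro v c hc hn hne
    obtain ⟨w, d⟩ := g
    have hd : 1 ≤ d := by
      have := normB_pos ((w, d) :: t) hn (w, d) (by simp)
      simpa using this
    have hwv : w ≠ v := by
      intro h
      exact hne d t (by rw [h])
    simp only [gFlat]
    have hrep : List.replicate d.toNat w = w :: List.replicate (d.toNat - 1) w := by
      have : d.toNat = (d.toNat - 1) + 1 := by omega
      rw [this, List.replicate_succ]
      simp [this.symm]
    rw [hrep, List.cons_append, collect, if_neg (fun h => hwv h.symm)]
    rw [show List.replicate (d.toNat - 1) w ++ gFlat t =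
          List.replicate (d.toNat - 1) w ++ gFlat t from rfl]
    rw [collect_replicate (d.toNat - 1) (gFlat t) w 1]
    have hcast : (1 : Int) + ((d.toNat - 1 : Nat) : Int) = d := by omega
    rw [hcast]
    cases t with
    | nil => simp [gFlat, collect]
    | cons h2 t2 =>
      obtain ⟨_, hne2, hrest⟩ : 1 ≤ d ∧ w ≠ h2.1 ∧ NormB (h2 :: t2) := hn
      have hne' : ∀ c2 u2, h2 :: t2 ≠ (w, c2) :: u2 := by
        intro c2 u2 h
        apply hne2
        have := congrArg (fun l => (l.headD ((0 : Int), (0 : Int))).1) h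
        simpa using this.symm
      rw [ih w d hd hrest hne']

-- ===== B's single pass over the run list =====
lemma passB : ∀ (gs : List (Int × Int)) (ret : Int) (kept : List (Int × Int)) (bombed : Bool),
    NormB kept → (∀ g ∈ gs, 1 ≤ g.2) →
    ∃ K, gs.foldl keepStep (ret, kept, bombed)
        = (ret + gScore gs, K, bombed || gs.any (fun g => decide ((4 : Int) ≤ g.2)))
      ∧ gFlat K = gFlat kept ++ gKept gs ∧ NormB K := by
  intro gs
  induction gs with
  | nil =>
    intro ret kept bombed hk _
    exact ⟨kept, by simp [gScore], by simp [gKept], hk⟩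
  | cons g t ih =>
    intro ret kept bombed hk hpos
    obtain ⟨v, c⟩ := g
    rw [List.foldl_cons]
    by_cases h4 : (4 : Int) ≤ c
    · rw [show keepStep (ret, kept, bombed) (v, c) = (ret + v * c, kept, true) from by
        simp [keepStep, h4]]
      obtain ⟨K, h1, h2, h3⟩ := ih (ret + v * c) kept true hk
        (fun g hg => hpos g (by simp [hg]))
      refine ⟨K, ?_, ?_, h3⟩
      · rw [h1]
        simp [gScore, h4, add_assoc]
      · rw [h2]
        simp [gKept, h4]
    · have hc : 1 ≤ c := by simpa using hpos (v, c) (by simp)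
      by_cases hv : (0 : Int) < v
      · rw [show keepStep (ret, kept, bombed) (v, c) = (ret, pushRun kept v c, bombed) from by
          simp [keepStep, h4, hv]]
        obtain ⟨K, h1, h2, h3⟩ := ih ret (pushRun kept v c) bombed
          (pushRun_norm kept v c hk hc) (fun g hg => hpos g (by simp [hg]))
        refine ⟨K, ?_, ?_, h3⟩
        · rw [h1]
          simp [gScore, h4]
        · rw [h2, gFlat_pushRun kept v c (by omega)
            (fun g hg => by have := normB_pos kept hk g hg; omega)]
          simp [gKept, h4, hv, List.append_assoc]
      · rw [show keepStep (ret, kept, bombed) (v, c) = (ret, kept, bombed) from by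
          simp [keepStep, h4, hv]]
        obtain ⟨K, h1, h2, h3⟩ := ih ret kept bombed hk (fun g hg => hpos g (by simp [hg]))
        refine ⟨K, ?_, ?_, h3⟩
        · rw [h1]; simp [gScore, h4]
        · rw [h2]; simp [gKept, h4, hv]

-- decodeRuns computes gFlat
lemma decodeRuns_eq : ∀ (gs : List (Int × Int)) (acc : List Int),
    gs.foldl (fun out g => out ++ List.replicate g.2.toNat g.1) acc = acc ++ gFlat gs := by
  intro gs
  induction gs with
  | nil => intro acc; simp [gFlat]
  | cons g t ih => intro acc; rw [List.foldl_cons, ih]; simp [gFlat]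

-- ===== the two while loops agree =====
lemma decodeRuns_gFlat (gs : List (Int × Int)) : decodeRuns gs = gFlat gs := by
  unfold decodeRuns
  rw [decodeRuns_eq]
  simp

lemma go_eq : ∀ (fuel : Nat) (ret : Int) (gs : List (Int × Int)), NormB gs →
    mbGo fuel ret (gFlat gs) = ((altLoop fuel ret gs).1, gFlat (altLoop fuel ret gs).2) := by
  intro fuel
  induction fuel with
  | zero => intro ret gs _; rfl
  | succ fuel ih =>
    intro ret gs hn
    cases gs with
    | nil =>
      simp [mbGo, altLoop, gFlat, gScore]
    | cons g t =>
      obtain ⟨v, c⟩ := g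
      have hc : 1 ≤ c := by
        have := normB_pos ((v, c) :: t) hn (v, c) (by simp); simpa using this
      have hrep : List.replicate c.toNat v = v :: List.replicate (c.toNat - 1) v := by
        have h : c.toNat = (c.toNat - 1) + 1 := by omega
        rw [h, List.replicate_succ]
        simp [h.symm]
      have hflat : gFlat ((v, c) :: t) = v :: (List.replicate (c.toNat - 1) v ++ gFlat t) := by
        rw [gFlat_cons]
        simp [hrep]
      have hcoll : collect v 1 (List.replicate (c.toNat - 1) v ++ gFlat t) = (v, c) :: t := by
        rw [collect_replicate]
        have hcast : (1 : Int) + ((c.toNat - 1 : Nat) : Int) = c := by omega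
        rw [hcast]
        cases t with
        | nil => simp [gFlat, collect]
        | cons h2 t2 =>
          obtain ⟨_, hne, hrest⟩ : 1 ≤ c ∧ v ≠ h2.1 ∧ NormB (h2 :: t2) := hn
          exact collect_gFlat (h2 :: t2) v c hc hrest
            (fun c2 u2 h => hne (by
              have := congrArg (fun l => (l.headD ((0 : Int), (0 : Int))).1) h
              simpa using this.symm))
      obtain ⟨K, hB1, hB2, hB3⟩ := passB ((v, c) :: t) ret [] false (by simp [NormB])
        (normB_pos _ hn)
      have hB2' : gFlat K = gKept ((v, c) :: t) := by simpa [gFlat] using hB2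
      rw [hflat]
      have hA := passA_eq (List.replicate (c.toNat - 1) v ++ gFlat t) [] v 1 0 ret 1
        (((v :: (List.replicate (c.toNat - 1) v ++ gFlat t)).length : Int)) (by omega) (by simp)
        (by simp; omega)
      simp only [List.nil_append, List.replicate_one, List.singleton_append, Nat.cast_one,
        zero_add, rz_nil] at hA
      have hget0 : PySem.List.pyGetD (v :: (List.replicate (c.toNat - 1) v ++ gFlat t)) 0 0 = v := by
        simp [PySem.List.pyGetD_zero_cons]
      rw [mbGo, if_neg (by simp), hget0, hA, hcoll]
      rw [show altLoop (fuel + 1) ret ((v, c) :: t)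
            = (let s := ((v, c) :: t).foldl keepStep (ret, [], false)
               if s.2.2 then altLoop fuel s.1 s.2.1 else (s.1, s.2.1)) from rfl]
      rw [hB1]
      simp only [Bool.false_or]
      by_cases hb : gBomb ((v, c) :: t) = 0
      · have hany := (gBomb_eq_zero_iff _).mp hb
        simp [hb, hany, hB2']
      · have hany : ((v, c) :: t).any (fun g => decide ((4 : Int) ≤ g.2)) = true := by
          rcases Bool.eq_false_or_eq_true (((v, c) :: t).any (fun g => decide ((4 : Int) ≤ g.2))) with h | h
          · exact h
          · exact absurd ((gBomb_eq_zero_iff _).mpr h) hb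
        have hIH := ih (ret + gScore ((v, c) :: t)) K hB3
        rw [hB2'] at hIH
        simp [hb, hany, hIH]

lemma marble_eq (line : List Int) : marble_bomb line = marble_bomb_alt line := by
  cases line with
  | nil => rfl
  | cons x xs =>
    rw [marble_bomb, marble_bomb_alt]
    simp only [enc_eq]
    obtain ⟨hn, _⟩ := collect_norm xs x 1 (by omega)
    have hflat : gFlat (collect x 1 xs) = x :: xs := by
      rw [gFlat_collect xs x 1 (by omega)]
      simp
    have := go_eq ((x :: xs).length + 1) 0 (collect x 1 xs) hn
    rw [hflat] at this
    rw [this]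
    simp [decodeRuns_gFlat]

-- ===== VERDICT (by name: the statement is the Claim_ definition above) =====
theorem marble_bomb_spec : Claim_equal_marble_bomb := by
  intro line _
  unfold Spec_marble_bomb
  exact marble_eq line
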